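-- pv_equiv track=rewrite | github.com/laozhou-in-germany/footage_thumbnail | src/utils/file_utils.py | get_safe_filename
-- ===== SOURCE A (Python) =====
-- def get_safe_filename(filename: str) -> str:
--     """
--     Convert a filename to a safe version by removing or replacing invalid characters.
--
--     Args:
--         filename: Original filename.
--
--     Returns:
--         Safe filename with invalid characters removed or replaced.
--     """
--     # Characters that are invalid in Windows filenames
--     invalid_chars = '<>:"/\\|?*'
--     safe_filename = filename
--
--     for char in invalid_chars:
--         safe_filename = safe_filename.replace(char, '_')
--
--     # Remove leading/trailing spaces and periods
--     safe_filename = safe_filename.strip(' .')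
--
--     # Ensure filename is not empty
--     if not safe_filename:
--         safe_filename = "untitled"
--
--     return safe_filename
-- ===== SOURCE B (Python) =====
-- INVALID = frozenset('<>:"/\\|?*')
--
--
-- def _lstrip_space_dot(chars):
--     """Drop leading spaces/periods from a list of characters."""
--     while chars and chars[0] in ' .':
--         chars = chars[1:]
--     return chars
--
--
-- def get_safe_filename(filename: str) -> str:
--     """
--     Convert a filename to a safe version by removing or replacing invalid characters.
--     """
--     chars = ['_' if c in INVALID else c for c in filename]
--     # strip leading, then (via reversal) trailing spaces and periods
--     chars = _lstrip_space_dot(chars)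
--     chars = _lstrip_space_dot(chars[::-1])[::-1]
--     return ''.join(chars) if chars else "untitled"
-- ===== Notes on version B (the rewrite author's own statement) =====
-- stated objective: alternative
-- what changed: Replaces A's nine sequential full-string replace passes and library strip with a single character-level pass emitting an underscore for characters in a precomputed invalid set, followed by a hand-written recursive left-strip applied to the list and to its reversal.
import Mathlib
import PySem

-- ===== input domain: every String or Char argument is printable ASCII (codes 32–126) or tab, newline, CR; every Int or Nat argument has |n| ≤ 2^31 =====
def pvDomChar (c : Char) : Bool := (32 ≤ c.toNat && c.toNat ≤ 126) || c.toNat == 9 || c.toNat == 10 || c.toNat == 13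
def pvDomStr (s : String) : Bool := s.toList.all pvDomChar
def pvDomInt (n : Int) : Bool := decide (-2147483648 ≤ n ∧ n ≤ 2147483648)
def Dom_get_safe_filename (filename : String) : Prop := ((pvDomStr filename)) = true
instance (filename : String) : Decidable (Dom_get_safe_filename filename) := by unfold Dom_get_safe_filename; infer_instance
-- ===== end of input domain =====

-- B replaces A's nine sequential full-string .replace passes and the library strip with
-- one character-level pass over the invalid set plus a hand-written recursive left-strip
-- applied to the list and its reversal (alternative decomposition, not claimed faster).

-- ===== PORT A =====
-- nine sequential replaces, one per invalid character, then strip(' .'), then fallback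
def get_safe_filename (filename : String) : String :=
  let invalid_chars : String := "<>:\"/\\|?*"
  let safe1 := invalid_chars.toList.foldl
    (fun acc c => PySem.Str.replace acc (String.ofList [c]) "_") filename
  let safe2 := PySem.Str.stripChars safe1 " ."
  if safe2 = "" then "untitled" else safe2

-- ===== PORT B =====
-- hand-written left-strip of spaces/periods (B's _lstrip_space_dot)
def lstripSpaceDot : List Char → List Char
  | [] => []
  | c :: t => if (" .".toList).contains c then lstripSpaceDot t else c :: t

-- one mapping pass over the invalid set, left-strip, reverse-left-strip-reverse, fallback
def get_safe_filename_alt (filename : String) : String :=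
  let invalid : PySem.Set Char := PySem.Set.ofList "<>:\"/\\|?*".toList
  let chars0 := filename.toList.map (fun c => if invalid.contains c then '_' else c)
  let chars1 := lstripSpaceDot chars0
  let chars2 := (lstripSpaceDot chars1.reverse).reverse
  if chars2.isEmpty then "untitled" else String.ofList chars2

-- ===== PRECONDITION & SPEC =====
def Spec_get_safe_filename (filename : String) (out : String) : Prop := out = get_safe_filename_alt filename
instance (filename : String) (out : String) : Decidable (Spec_get_safe_filename filename out) := by unfold Spec_get_safe_filename; infer_instance

-- ===== CLAIM (what is proved, stated in full; the proofs are below) =====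
def Claim_equal_get_safe_filename : Prop := ∀ (filename : String), Dom_get_safe_filename filename → Spec_get_safe_filename filename (get_safe_filename filename)

-- ===== LEMMAS AND PROOFS =====

-- replacing a single character by '_' is a map over the characters
theorem replace_go_single (c : Char) :
    ∀ (fuel : Nat) (l acc : List Char), l.length ≤ fuel →
      PySem.Chars.replace.go [c] ['_'] fuel l acc
        = acc.reverse ++ l.map (fun x => if x = c then '_' else x) := by
  intro fuel
  induction fuel with
  | zero =>
    intro l acc h
    have : l = [] := List.length_eq_zero_iff.mp (Nat.le_zero.mp h)
    subst this
    simp [PySem.Chars.replace.go]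
  | succ n ih =>
    intro l acc h
    cases l with
    | nil => simp [PySem.Chars.replace.go]
    | cons x t =>
      have hlen : t.length ≤ n := by simpa using Nat.succ_le_succ_iff.mp h
      have hpre : List.isPrefixOf [c] (x :: t) = (c == x) := by
        simp [List.isPrefixOf]
      simp only [PySem.Chars.replace.go, hpre]
      by_cases hx : x = c
      · subst hx
        simp only [BEq.rfl, if_true, List.length_cons, List.length_nil,
          Nat.zero_add, List.drop_one, List.tail_cons, List.reverse_cons,
          List.reverse_nil, List.nil_append]
        rw [ih t _ hlen]
        simp
      · have : (c == x) = false := by simp; exact fun hcx => (hx hcx.symm).elim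
        rw [this]
        simp only [Bool.false_eq_true, if_false]
        rw [ih t _ hlen]
        simp [hx]

theorem replace_single (c : Char) (l : List Char) :
    PySem.Chars.replace l [c] ['_'] = l.map (fun x => if x = c then '_' else x) := by
  simp only [PySem.Chars.replace, List.isEmpty_cons, Bool.false_eq_true, if_false]
  simpa using replace_go_single c l.length l [] le_rfl

-- the string fold of A's loop, moved to character lists
theorem toList_fold_replace (cs : List Char) (s : String) :
    (cs.foldl (fun acc c => PySem.Str.replace acc (String.ofList [c]) "_") s).toList
      = cs.foldl (fun acc c => PySem.Chars.replace acc [c] ['_']) s.toList := by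
  induction cs generalizing s with
  | nil => rfl
  | cons c cs ih =>
    simp only [List.foldl_cons]
    rw [ih]
    congr 1
    rw [PySem.Str.toList_replace]
    simp

-- sequential single-character replaces are one map with a membership test
theorem fold_replace_eq_map (cs : List Char) (h : '_' ∉ cs) (l : List Char) :
    cs.foldl (fun acc c => PySem.Chars.replace acc [c] ['_']) l
      = l.map (fun x => if x ∈ cs then '_' else x) := by
  induction cs generalizing l with
  | nil => simp
  | cons c cs ih =>
    simp only [List.foldl_cons]
    rw [replace_single, ih (fun hm => h (List.mem_cons_of_mem _ hm)), List.map_map]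
    apply List.map_congr_left
    intro x _
    by_cases hx : x = c
    · subst hx
      simp only [Function.comp, List.mem_cons, true_or, if_true]
      rw [if_neg (fun hm => h (List.mem_cons_of_mem _ hm))]
    · simp [Function.comp, hx]

-- B's hand-written left-strip is dropWhile of the ' '/'.' test
theorem lstripSpaceDot_eq_dropWhile (l : List Char) :
    lstripSpaceDot l = l.dropWhile (fun c => (" .".toList).contains c) := by
  induction l with
  | nil => rfl
  | cons c t ih =>
    simp only [lstripSpaceDot, List.dropWhile_cons]
    split_ifs
    · exact ih
    · rfl

-- ===== VERDICT (by name: the statement is the Claim_ definition above) =====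
theorem get_safe_filename_spec : Claim_equal_get_safe_filename := by
  intro filename _
  unfold Spec_get_safe_filename get_safe_filename get_safe_filename_alt
  have key : (("<>:\"/\\|?*".toList).foldl
      (fun acc c => PySem.Str.replace acc (String.ofList [c]) "_") filename)
      = String.ofList (filename.toList.map
          (fun c => if (PySem.Set.ofList "<>:\"/\\|?*".toList).contains c then '_' else c)) := by
    rw [← String.toList_inj, toList_fold_replace, fold_replace_eq_map _ (by decide)]
    simp only [String.toList_ofList]
    apply List.map_congr_left
    intro x _
    have hc : (PySem.Set.ofList "<>:\"/\\|?*".toList).contains x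
        = decide (x ∈ "<>:\"/\\|?*".toList) := by
      rw [Bool.eq_iff_iff, PySem.Set.contains_iff, PySem.Set.mem_ofList, decide_eq_true_eq]
    rw [hc]; simp
  simp only [key]
  -- reduce A's stripChars to B's two left-strips
  set m := filename.toList.map
      (fun c => if (PySem.Set.ofList "<>:\"/\\|?*".toList).contains c then '_' else c) with hm
  have hstrip : (PySem.Str.stripChars (String.ofList m) " .").toList
      = (lstripSpaceDot (lstripSpaceDot m).reverse).reverse := by
    rw [PySem.Str.toList_stripChars]
    simp only [PySem.Chars.stripChars, String.toList_ofList]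
    rw [lstripSpaceDot_eq_dropWhile, lstripSpaceDot_eq_dropWhile]
  have hempty : (PySem.Str.stripChars (String.ofList m) " ." = "")
      ↔ ((lstripSpaceDot (lstripSpaceDot m).reverse).reverse.isEmpty = true) := by
    rw [← String.toList_inj, hstrip]
    simp [List.isEmpty_iff]
  by_cases h : (lstripSpaceDot (lstripSpaceDot m).reverse).reverse.isEmpty = true
  · rw [if_pos (hempty.mpr h), if_pos h]
  · rw [if_neg (fun he => h (hempty.mp he)), if_neg h]
    rw [← String.toList_inj, hstrip]
    simp
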